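-- pv_equiv track=rewrite | github.com/XyzHuy/-DL-Fine-tuning-coding-model | data/solution/Solution1580.py | maxBoxesInWarehouse
-- ===== SOURCE A (Python) =====
-- from typing import List
--
-- def maxBoxesInWarehouse(boxes: List[int], warehouse: List[int]) -> int:
--     # Sort the boxes in non-decreasing order
--     boxes.sort()
--
--     # Create a list to store the minimum height from the left to each position
--     left_min = [0] * len(warehouse)
--     left_min[0] = warehouse[0]
--     for i in range(1, len(warehouse)):
--         left_min[i] = min(left_min[i - 1], warehouse[i])
--
--     # Create a list to store the minimum height from the right to each position
--     right_min = [0] * len(warehouse)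
--     right_min[-1] = warehouse[-1]
--     for i in range(len(warehouse) - 2, -1, -1):
--         right_min[i] = min(right_min[i + 1], warehouse[i])
--
--     # Create a list to store the actual height of each position in the warehouse
--     actual_height = [0] * len(warehouse)
--     for i in range(len(warehouse)):
--         actual_height[i] = max(left_min[i], right_min[i])
--
--     # Sort the actual heights of the warehouse in non-decreasing order
--     actual_height.sort()
--
--     # Two pointers to traverse boxes and actual_height
--     box_index = 0
--     height_index = 0
--
--     # Count the number of boxes that can be placed
--     while box_index < len(boxes) and height_index < len(actual_height):
--         if boxes[box_index] <= actual_height[height_index]: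
--             box_index += 1
--         height_index += 1
--
--     return box_index
-- ===== SOURCE B (Python) =====
-- from typing import List
--
-- def maxBoxesInWarehouse(boxes: List[int], warehouse: List[int]) -> int:
--     # Sort boxes ascending in place (same mutation as the original).
--     boxes.sort()
--
--     count = 0
--     l, r = 0, len(warehouse) - 1
--     lmin, rmin = warehouse[0], warehouse[r]
--
--     # Largest boxes first; walk the raw warehouse from both ends with
--     # running minima instead of building and sorting effective heights.
--     for b in reversed(boxes):
--         if l > r:
--             break
--         lmin = min(lmin, warehouse[l])
--         rmin = min(rmin, warehouse[r])
--         if b <= lmin or b <= rmin: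
--             count += 1
--             if lmin >= rmin:
--                 l += 1
--             else:
--                 r -= 1
--     return count
-- ===== Notes on version B (the rewrite author's own statement) =====
-- stated objective: alternative
-- what changed: Replaces A's three auxiliary min/max arrays, second sort and smallest-first two-pointer match by a single both-ends walk over the raw warehouse with two running minima, placing the largest remaining box at whichever frontier it fits under; only boxes is sorted.
import Mathlib
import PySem

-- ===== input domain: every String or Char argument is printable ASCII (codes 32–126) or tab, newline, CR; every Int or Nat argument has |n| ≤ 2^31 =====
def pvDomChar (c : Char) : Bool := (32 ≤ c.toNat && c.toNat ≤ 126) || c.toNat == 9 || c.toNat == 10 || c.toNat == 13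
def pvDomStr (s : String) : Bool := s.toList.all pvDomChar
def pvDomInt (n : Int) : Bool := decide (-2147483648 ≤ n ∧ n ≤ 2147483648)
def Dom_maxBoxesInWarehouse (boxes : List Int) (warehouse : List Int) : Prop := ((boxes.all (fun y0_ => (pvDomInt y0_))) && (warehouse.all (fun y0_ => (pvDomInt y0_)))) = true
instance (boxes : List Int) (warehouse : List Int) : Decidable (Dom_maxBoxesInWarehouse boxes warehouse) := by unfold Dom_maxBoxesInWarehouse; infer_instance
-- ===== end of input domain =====

-- B replaces A's three auxiliary min/max arrays, the second sort and the smallest-first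
-- match by one both-ends walk over the raw warehouse with running minima, placing the
-- largest remaining box first (objective: alternative algorithm, no second sort and no
-- auxiliary arrays). Both A and B sort `boxes` in place; the equivalence proved here is
-- about the return value (the mutation of `boxes` is identical in A and B anyway).

-- ===== PORT A =====
-- left_min loop: left_min[i] = min(left_min[i-1], warehouse[i])
def pvPrefAux (m : Int) : List Int → List Int
  | [] => []
  | y :: ys => (min m y) :: pvPrefAux (min m y) ys

def pvLeftMin : List Int → List Int
  | [] => []
  | x :: xs => x :: pvPrefAux x xs

-- right_min loop (backwards): right_min[i] = min(right_min[i+1], warehouse[i])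
def pvRightMin : List Int → List Int
  | [] => []
  | x :: xs =>
    match pvRightMin xs with
    | [] => [x]
    | y :: ys => (min y x) :: y :: ys

-- the final while loop; returns box_index (= number of boxes matched)
def pvCountA : List Int → List Int → Int
  | [], _ => 0
  | _ :: _, [] => 0
  | b :: bs, h :: hs => if b ≤ h then 1 + pvCountA bs hs else pvCountA (b :: bs) hs

def maxBoxesInWarehouse (boxes : List Int) (warehouse : List Int) : Int :=
  let bs := PySem.List.sorted boxes (fun x => x) false   -- boxes.sort()
  match warehouse with
  | [] => 0          -- Python raises IndexError (left_min[0]); excluded by Pre_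
  | _ :: _ =>
    let lm := pvLeftMin warehouse
    let rm := pvRightMin warehouse
    let ah := List.zipWith max lm rm                     -- actual_height
    pvCountA bs (PySem.List.sorted ah (fun x => x) false)

-- ===== PORT B =====
-- the `for b in reversed(boxes)` loop of Source B, with integer indices l, r
def pvScanB (w : List Int) : List Int → Int → Int → Int → Int → Int → Int
  | [], _, _, _, _, cnt => cnt
  | b :: bs, l, r, lmin, rmin, cnt =>
    if l > r then cnt
    else
      let lmin' := min lmin ((PySem.List.pyGet? w l).getD 0)
      let rmin' := min rmin ((PySem.List.pyGet? w r).getD 0)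
      if b ≤ lmin' ∨ b ≤ rmin' then
        if lmin' ≥ rmin' then pvScanB w bs (l + 1) r lmin' rmin' (cnt + 1)
        else pvScanB w bs l (r - 1) lmin' rmin' (cnt + 1)
      else pvScanB w bs l r lmin' rmin' cnt

def maxBoxesInWarehouse_alt (boxes : List Int) (warehouse : List Int) : Int :=
  let bs := PySem.List.sorted boxes (fun x => x) false   -- boxes.sort()
  match warehouse with
  | [] => 0          -- Python raises IndexError (warehouse[0]); excluded by Pre_
  | _ :: _ =>
    let r : Int := (warehouse.length : Int) - 1
    pvScanB warehouse bs.reverse 0 r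
      ((PySem.List.pyGet? warehouse 0).getD 0)
      ((PySem.List.pyGet? warehouse r).getD 0) 0

-- ===== PRECONDITION & SPEC =====
-- Pre_ excludes only the empty warehouse, on which both Pythons raise IndexError.
def Pre_maxBoxesInWarehouse (boxes : List Int) (warehouse : List Int) : Prop :=
  warehouse ≠ []
instance (boxes : List Int) (warehouse : List Int) : Decidable (Pre_maxBoxesInWarehouse boxes warehouse) := by
  unfold Pre_maxBoxesInWarehouse; infer_instance

def pvWitness_maxBoxesInWarehouse : List Int × List Int := ([1, 3, 2], [4, 2, 3, 5])

def Spec_maxBoxesInWarehouse (boxes : List Int) (warehouse : List Int) (out : Int) : Prop := out = maxBoxesInWarehouse_alt boxes warehouse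
instance (boxes : List Int) (warehouse : List Int) (out : Int) : Decidable (Spec_maxBoxesInWarehouse boxes warehouse out) := by unfold Spec_maxBoxesInWarehouse; infer_instance

-- ===== CLAIM (what is proved, stated in full; the proofs are below) =====
def Claim_equal_maxBoxesInWarehouse : Prop := ∀ (boxes : List Int) (warehouse : List Int), Dom_maxBoxesInWarehouse boxes warehouse → Pre_maxBoxesInWarehouse boxes warehouse → Spec_maxBoxesInWarehouse boxes warehouse (maxBoxesInWarehouse boxes warehouse)

-- ===== LEMMAS AND PROOFS =====

/- Semantic values: prefix minimum L, suffix minimum R, effective height. -/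
def pvMin1 : List Int → Int
  | [] => 0
  | x :: xs => xs.foldl min x

def pvL (w : List Int) (i : Nat) : Int := pvMin1 (w.take (i + 1))
def pvR (w : List Int) (i : Nat) : Int := pvMin1 (w.drop i)
def pvEff (w : List Int) (i : Nat) : Int := max (pvL w i) (pvR w i)

/- The (pure) sequence of effective heights consumed by B's both-ends walk,
   largest first; window is [l, l+k]. -/
def pvStream (w : List Int) (l : Nat) : Nat → List Int
  | 0 => [max (pvL w l) (pvR w l)]
  | k + 1 =>
    if pvL w l ≥ pvR w (l + (k + 1)) then pvL w l :: pvStream w (l + 1) k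
    else pvR w (l + (k + 1)) :: pvStream w l k

-- ---- foldl min facts ----
theorem pvFoldlMin_min (ys : List Int) : ∀ a b : Int, List.foldl min (min a b) ys = min a (List.foldl min b ys) := by
  induction ys with
  | nil => intro a b; rfl
  | cons c ys ih =>
    intro a b
    simp only [List.foldl_cons]
    rw [min_assoc, ih]

theorem pvFoldlMin_le_init (ys : List Int) : ∀ a : Int, List.foldl min a ys ≤ a := by
  induction ys with
  | nil => intro a; simp
  | cons c ys ih =>
    intro a
    simp only [List.foldl_cons]
    exact le_trans (ih _) (min_le_left _ _)

theorem pvMin1_cons (x : Int) (xs : List Int) (h : xs ≠ []) :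
    pvMin1 (x :: xs) = min x (pvMin1 xs) := by
  cases xs with
  | nil => exact absurd rfl h
  | cons y ys => simp only [pvMin1, List.foldl_cons]; rw [pvFoldlMin_min]

theorem pvMin1_append (xs ys : List Int) (h : xs ≠ []) :
    pvMin1 (xs ++ ys) = List.foldl min (pvMin1 xs) ys := by
  cases xs with
  | nil => exact absurd rfl h
  | cons x t => simp [pvMin1, List.foldl_append]

theorem pvMin1_append_left_le (xs ys : List Int) (h : xs ≠ []) :
    pvMin1 (xs ++ ys) ≤ pvMin1 xs := by
  rw [pvMin1_append xs ys h]; exact pvFoldlMin_le_init _ _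

-- ---- L and R recurrences / monotonicity ----
theorem pvL_zero (x : Int) (xs : List Int) : pvL (x :: xs) 0 = x := rfl

theorem pvL_succ (w : List Int) (i : Nat) (h : i + 1 < w.length) :
    pvL w (i + 1) = min (pvL w i) (w.getD (i + 1) 0) := by
  have htake : w.take (i + 2) = w.take (i + 1) ++ [w[i + 1]] := by
    rw [List.take_add_one]
    simp [List.getElem?_eq_getElem h]
  have hne : w.take (i + 1) ≠ [] := by
    simp only [ne_eq, List.take_eq_nil_iff, not_or]
    exact ⟨by omega, by intro hc; simp [hc] at h⟩
  unfold pvL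
  rw [htake, pvMin1_append _ _ hne]
  simp [List.getD, List.getElem?_eq_getElem h]

theorem pvL_le_getD (w : List Int) (i : Nat) (h : i < w.length) :
    pvL w i ≤ w.getD i 0 := by
  cases i with
  | zero =>
    cases w with
    | nil => simp at h
    | cons x xs => simp [pvL_zero]
  | succ j =>
    rw [pvL_succ w j h]
    exact min_le_right _ _

theorem pvL_antitone (w : List Int) (i j : Nat) (hij : i ≤ j) (hj : j < w.length) :
    pvL w j ≤ pvL w i := by
  have h1 : List.take (i + 1) (List.take (j + 1) w) = List.take (i + 1) w := by
    rw [List.take_take]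
    congr 1
    omega
  have : w.take (j + 1) = w.take (i + 1) ++ (w.take (j + 1)).drop (i + 1) := by
    rw [← h1]
    exact (List.take_append_drop _ _).symm
  have hne : w.take (i + 1) ≠ [] := by
    simp only [ne_eq, List.take_eq_nil_iff, not_or]
    exact ⟨by omega, by intro hc; simp [hc] at hj⟩
  unfold pvL
  rw [this]
  exact pvMin1_append_left_le _ _ hne

theorem pvR_last (w : List Int) (h : w ≠ []) :
    pvR w (w.length - 1) = w.getD (w.length - 1) 0 := by
  have hlt : w.length - 1 < w.length := by
    cases w with | nil => exact absurd rfl h | cons x xs => simp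
  have hdrop : w.drop (w.length - 1) = [w[w.length - 1]] := by
    rw [List.drop_eq_getElem_cons hlt]
    have : w.drop (w.length - 1 + 1) = [] := by
      apply List.drop_eq_nil_of_le; omega
    rw [this]
  unfold pvR
  rw [hdrop]
  simp [pvMin1, List.getD, List.getElem?_eq_getElem hlt]

theorem pvR_succ (w : List Int) (i : Nat) (h : i + 1 < w.length) :
    pvR w i = min (w.getD i 0) (pvR w (i + 1)) := by
  have hi : i < w.length := by omega
  have hdrop : w.drop i = w[i] :: w.drop (i + 1) := List.drop_eq_getElem_cons hi
  have hne : w.drop (i + 1) ≠ [] := by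
    simp only [ne_eq, List.drop_eq_nil_iff]; omega
  unfold pvR
  rw [hdrop, pvMin1_cons _ _ hne, List.getD_eq_getElem _ _ hi]

theorem pvR_le_getD (w : List Int) (i : Nat) (h : i < w.length) :
    pvR w i ≤ w.getD i 0 := by
  by_cases h1 : i + 1 < w.length
  · rw [pvR_succ w i h1]; exact min_le_left _ _
  · have : i = w.length - 1 := by omega
    subst this
    rw [pvR_last w (by intro hc; simp [hc] at h)]

theorem pvR_mono (w : List Int) (i j : Nat) (hij : i ≤ j) (hj : j < w.length) :
    pvR w i ≤ pvR w j := by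
  induction j with
  | zero =>
    have h0 : i = 0 := Nat.le_zero.mp hij
    subst h0
    exact le_refl _
  | succ k ih =>
    rcases Nat.lt_or_ge i (k + 1) with hlt | hge
    · have hk : k < w.length := by omega
      have := ih (by omega) (by omega)
      calc pvR w i ≤ pvR w k := this
      _ ≤ pvR w (k + 1) := by rw [pvR_succ w k hj]; exact min_le_right _ _
    · have : i = k + 1 := by omega
      simp [this]

theorem pvL_zero' (w : List Int) (h : w ≠ []) : pvL w 0 = w.getD 0 0 := by
  cases w with
  | nil => exact absurd rfl h
  | cons x xs => simp [pvL_zero]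

-- ---- A's arrays are exactly L and R ----
theorem pvPrefAux_eq (ys : List Int) : ∀ m : Int,
    pvPrefAux m ys = (List.range ys.length).map (fun i => List.foldl min m (ys.take (i + 1))) := by
  induction ys with
  | nil => intro m; rfl
  | cons y ys ih =>
    intro m
    simp only [pvPrefAux, List.length_cons, List.range_succ_eq_map, List.map_cons, List.map_map]
    congr 1
    rw [ih (min m y)]
    apply List.map_congr_left
    intro i _
    simp

theorem pvLeftMin_eq (w : List Int) : pvLeftMin w = (List.range w.length).map (pvL w) := by
  cases w with
  | nil => rfl
  | cons x xs =>
    simp only [pvLeftMin, List.length_cons, List.range_succ_eq_map, List.map_cons, List.map_map]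
    congr 1
    rw [pvPrefAux_eq]
    apply List.map_congr_left
    intro i _
    simp only [Function.comp_apply, pvL, List.take_succ_cons, pvMin1]

theorem pvRightMin_eq (w : List Int) : pvRightMin w = (List.range w.length).map (pvR w) := by
  induction w with
  | nil => rfl
  | cons x xs ih =>
    cases hxs : xs with
    | nil => simp [pvRightMin, pvR, pvMin1]
    | cons y ys =>
      rw [← hxs]
      have hne : xs ≠ [] := by rw [hxs]; simp
      have hR : (List.range (x :: xs).length).map (pvR (x :: xs))
          = pvR (x :: xs) 0 :: pvRightMin xs := by
        rw [List.length_cons, List.range_succ_eq_map, List.map_cons, List.map_map]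
        congr 1
        rw [ih]
        apply List.map_congr_left
        intro i _
        rfl
      have ih' : pvRightMin xs = pvR xs 0 :: ((List.range ys.length).map (pvR xs ∘ Nat.succ)) := by
        rw [ih, show xs.length = ys.length + 1 from by rw [hxs]; rfl,
          List.range_succ_eq_map, List.map_cons, List.map_map]
      have hstep : pvRightMin (x :: xs) = min (pvR xs 0) x :: pvRightMin xs := by
        show (match pvRightMin xs with
          | [] => [x]
          | y :: ys => (min y x) :: y :: ys) = _
        rw [ih']
      rw [hstep, hR]
      congr 1
      have h1 : pvR xs 0 = pvMin1 xs := by unfold pvR; rw [List.drop_zero]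
      have h2 : pvR (x :: xs) 0 = min x (pvMin1 xs) := by
        unfold pvR
        rw [List.drop_zero]
        exact pvMin1_cons x xs hne
      rw [h1, h2, min_comm]

theorem pvZipWith_map (f g : Nat → Int) (t : List Nat) :
    List.zipWith max (t.map f) (t.map g) = t.map (fun i => max (f i) (g i)) := by
  induction t with
  | nil => rfl
  | cons a t ih => simp [ih]

theorem pvActual_eq (w : List Int) :
    List.zipWith max (pvLeftMin w) (pvRightMin w) = (List.range w.length).map (pvEff w) := by
  rw [pvLeftMin_eq, pvRightMin_eq, pvZipWith_map]
  rfl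

-- ---- the stream is a non-increasing enumeration of the effective heights ----
theorem pvStream_perm (w : List Int) : ∀ k l : Nat, l + k < w.length →
    (pvStream w l k).Perm ((List.range' l (k + 1)).map (pvEff w)) := by
  intro k
  induction k with
  | zero =>
    intro l h
    simp [pvStream, pvEff, List.range']
  | succ k ih =>
    intro l h
    by_cases hc : pvL w l ≥ pvR w (l + (k + 1))
    · have h1 : pvEff w l = pvL w l := by
        unfold pvEff
        have : pvR w l ≤ pvR w (l + (k + 1)) := pvR_mono w l (l + (k + 1)) (by omega) h
        exact max_eq_left (le_trans this hc)
      rw [pvStream, if_pos hc]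
      have : List.range' l (k + 1 + 1) = l :: List.range' (l + 1) (k + 1) := by
        rw [List.range'_succ]
      rw [this, List.map_cons, ← h1]
      exact List.Perm.cons _ (ih (l + 1) (by omega))
    · push_neg at hc
      have h1 : pvEff w (l + (k + 1)) = pvR w (l + (k + 1)) := by
        unfold pvEff
        have : pvL w (l + (k + 1)) ≤ pvL w l := pvL_antitone w l (l + (k + 1)) (by omega) h
        exact max_eq_right (le_of_lt (lt_of_le_of_lt this hc))
      rw [pvStream, if_neg (not_le.mpr hc)]
      have hsp : List.range' l (k + 1 + 1) = List.range' l (k + 1) ++ [l + (k + 1)] := by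
        rw [List.range'_1_concat]
      rw [hsp, List.map_append, List.map_singleton, ← h1]
      refine List.Perm.trans (List.Perm.cons _ (ih l (by omega))) ?_
      have hm := (List.perm_middle (a := pvEff w (l + (k + 1)))
        (l₁ := (List.range' l (k + 1)).map (pvEff w)) (l₂ := ([] : List Int))).symm
      simpa using hm

theorem pvStream_bound (w : List Int) : ∀ k l : Nat, l + k < w.length →
    ∀ x ∈ pvStream w l k, x ≤ max (pvL w l) (pvR w (l + k)) := by
  intro k l h x hx
  have hp := pvStream_perm w k l h
  have hx' : x ∈ (List.range' l (k + 1)).map (pvEff w) := hp.mem_iff.mp hx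
  obtain ⟨i, hi, rfl⟩ := List.mem_map.mp hx'
  have hi' : l ≤ i ∧ i < l + (k + 1) := by
    constructor
    · exact (List.mem_range'_1.mp hi).1
    · exact (List.mem_range'_1.mp hi).2
  unfold pvEff
  apply max_le_max
  · exact pvL_antitone w l i hi'.1 (by omega)
  · exact pvR_mono w i (l + k) (by omega) (by omega)

theorem pvStream_sorted (w : List Int) : ∀ k l : Nat, l + k < w.length →
    (pvStream w l k).Pairwise (· ≥ ·) := by
  intro k
  induction k with
  | zero => intro l h; simp [pvStream]
  | succ k ih =>
    intro l h
    by_cases hc : pvL w l ≥ pvR w (l + (k + 1))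
    · rw [pvStream, if_pos hc]
      refine List.pairwise_cons.mpr ⟨?_, ih (l + 1) (by omega)⟩
      intro x hx
      have hb := pvStream_bound w k (l + 1) (by omega) x hx
      have h1 : pvL w (l + 1) ≤ pvL w l := pvL_antitone w l (l + 1) (by omega) (by omega)
      have h2 : pvR w (l + 1 + k) ≤ pvR w (l + (k + 1)) := pvR_mono w (l + 1 + k) (l + (k + 1)) (by omega) h
      calc x ≤ max (pvL w (l + 1)) (pvR w (l + 1 + k)) := hb
      _ ≤ pvL w l := max_le h1 (le_trans h2 hc)
    · push_neg at hc
      rw [pvStream, if_neg (not_le.mpr hc)]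
      refine List.pairwise_cons.mpr ⟨?_, ih l (by omega)⟩
      intro x hx
      have hb := pvStream_bound w k l (by omega) x hx
      have h2 : pvR w (l + k) ≤ pvR w (l + (k + 1)) := pvR_mono w (l + k) (l + (k + 1)) (by omega) h
      calc x ≤ max (pvL w l) (pvR w (l + k)) := hb
      _ ≤ pvR w (l + (k + 1)) := max_le (le_of_lt hc) h2

-- ---- greedy from the small end = greedy from the large end ----
theorem pvCountA_nil_right (bs : List Int) : pvCountA bs [] = 0 := by
  cases bs <;> rfl

theorem pvCountA_skip_top (hs : List Int) : ∀ (bs : List Int) (x : Int),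
    (∀ c ∈ hs, c < x) → pvCountA (bs ++ [x]) hs = pvCountA bs hs := by
  induction hs with
  | nil => intro bs x _; rw [pvCountA_nil_right, pvCountA_nil_right]
  | cons c hs ih =>
    intro bs x hlt
    cases bs with
    | nil =>
      simp only [List.nil_append, pvCountA]
      rw [if_neg (not_le.mpr (hlt c (by simp)))]
      have h2 := ih [] x (fun d hd => hlt d (by simp [hd]))
      simpa [pvCountA] using h2
    | cons a bs' =>
      simp only [List.cons_append, pvCountA]
      by_cases hac : a ≤ c
      · rw [if_pos hac, if_pos hac, ih bs' x (fun d hd => hlt d (by simp [hd]))]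
      · rw [if_neg hac, if_neg hac]
        exact ih (a :: bs') x (fun d hd => hlt d (by simp [hd]))

theorem pvCountA_match_top (hs : List Int) : ∀ (bs : List Int) (x y : Int),
    (∀ a ∈ bs, a ≤ x) → (∀ c ∈ hs, c ≤ y) → x ≤ y →
    pvCountA (bs ++ [x]) (hs ++ [y]) = 1 + pvCountA bs hs := by
  induction hs with
  | nil =>
    intro bs x y hb _ hxy
    cases bs with
    | nil => simp [pvCountA, hxy]
    | cons a bs' =>
      simp only [List.cons_append, List.nil_append, pvCountA]
      rw [if_pos (le_trans (hb a (by simp)) hxy)]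
      rw [pvCountA_nil_right]
  | cons c hs' ih =>
    intro bs x y hb hh hxy
    cases bs with
    | nil =>
      simp only [List.nil_append, List.cons_append, pvCountA]
      by_cases hxc : x ≤ c
      · rw [if_pos hxc]
        try rfl
      · rw [if_neg hxc]
        have h2 := ih [] x y (by simp) (fun d hd => hh d (by simp [hd])) hxy
        simpa [pvCountA] using h2
    | cons a bs' =>
      simp only [List.cons_append, pvCountA]
      by_cases hac : a ≤ c
      · rw [if_pos hac, if_pos hac]
        rw [ih bs' x y (fun d hd => hb d (by simp [hd])) (fun d hd => hh d (by simp [hd])) hxy]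
      · rw [if_neg hac, if_neg hac]
        rw [show a :: (bs' ++ [x]) = (a :: bs') ++ [x] from rfl]
        exact ih (a :: bs') x y hb (fun d hd => hh d (by simp [hd])) hxy

def pvGd : List Int → List Int → Int
  | [], _ => 0
  | _ :: _, [] => 0
  | b :: bs, h :: hs => if b ≤ h then 1 + pvGd bs hs else pvGd bs (h :: hs)

theorem pvGd_eq_countA : ∀ (p q : List Int), p.Pairwise (· ≥ ·) → q.Pairwise (· ≥ ·) →
    pvGd p q = pvCountA p.reverse q.reverse := by
  intro p
  induction p with
  | nil =>
    intro q _ _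
    rw [show pvGd [] q = 0 from rfl, List.reverse_nil]
    cases hq : q.reverse <;> rfl
  | cons x p' ih =>
    intro q hp hq
    have hp' := (List.pairwise_cons.mp hp).2
    have hpx := (List.pairwise_cons.mp hp).1
    cases q with
    | nil =>
      rw [show pvGd (x :: p') [] = 0 from rfl, List.reverse_nil, pvCountA_nil_right]
    | cons y q' =>
      have hq' := (List.pairwise_cons.mp hq).2
      have hqy := (List.pairwise_cons.mp hq).1
      simp only [List.reverse_cons]
      by_cases hxy : x ≤ y
      · rw [show pvGd (x :: p') (y :: q') = if x ≤ y then 1 + pvGd p' q' else pvGd p' (y :: q') from rfl,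
          if_pos hxy]
        rw [pvCountA_match_top q'.reverse p'.reverse x y
          (fun a ha => hpx a (List.mem_reverse.mp ha))
          (fun c hc => hqy c (List.mem_reverse.mp hc)) hxy]
        rw [ih q' hp' hq']
      · have hlt : ∀ c ∈ q'.reverse ++ [y], c < x := by
          intro c hc
          rcases List.mem_append.mp hc with h1 | h1
          · exact lt_of_le_of_lt (hqy c (List.mem_reverse.mp h1)) (not_le.mp hxy)
          · simp at h1; subst h1; exact not_le.mp hxy
        calc pvGd (x :: p') (y :: q') = pvGd p' (y :: q') := by
              rw [show pvGd (x :: p') (y :: q') = if x ≤ y then 1 + pvGd p' q' else pvGd p' (y :: q') from rfl,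
                if_neg hxy]
        _ = pvCountA p'.reverse (y :: q').reverse := ih (y :: q') hp' hq
        _ = pvCountA p'.reverse (q'.reverse ++ [y]) := by rw [List.reverse_cons]
        _ = pvCountA (p'.reverse ++ [x]) (q'.reverse ++ [y]) :=
              (pvCountA_skip_top (q'.reverse ++ [y]) p'.reverse x hlt).symm

-- ---- B's scan computes pvGd over the stream ----
theorem pvScanB_done (w : List Int) (bs : List Int) (l r lmin rmin cnt : Int) (h : l > r) :
    pvScanB w bs l r lmin rmin cnt = cnt := by
  cases bs with
  | nil => rfl
  | cons b bs => rw [pvScanB, if_pos h]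

theorem pvGd_nil_right (bs : List Int) : pvGd bs [] = 0 := by
  cases bs <;> rfl

theorem pvGetNat (w : List Int) (n : Nat) :
    ((PySem.List.pyGet? w (↑n)).getD 0) = w.getD n 0 := by
  simp [PySem.List.pyGet?_natCast, List.getD_eq_getElem?_getD]

theorem pvScanB_glue (w : List Int) : ∀ (bs : List Int) (ln k : Nat) (lmin rmin cnt : Int),
    ln + k < w.length →
    min lmin (w.getD ln 0) = pvL w ln →
    min rmin (w.getD (ln + k) 0) = pvR w (ln + k) →
    pvScanB w bs (↑ln) (↑(ln + k)) lmin rmin cnt = cnt + pvGd bs (pvStream w ln k) := by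
  intro bs
  induction bs with
  | nil =>
    intro ln k lmin rmin cnt h hl hr
    rw [show pvGd [] (pvStream w ln k) = 0 from rfl]
    rw [show pvScanB w [] (↑ln) (↑(ln + k)) lmin rmin cnt = cnt from rfl]
    ring
  | cons b bs ih =>
    intro ln k lmin rmin cnt h hl hr
    rw [pvScanB]
    rw [if_neg (by push_cast; omega : ¬((ln : Int) > ↑(ln + k)))]
    simp only [pvGetNat]
    rw [hl, hr]
    cases k with
    | zero =>
      simp only [Nat.add_zero] at hr ⊢
      rw [show pvStream w ln 0 = [max (pvL w ln) (pvR w ln)] from rfl]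
      by_cases hfit : b ≤ pvL w ln ∨ b ≤ pvR w ln
      · rw [if_pos hfit]
        rw [show pvGd (b :: bs) [max (pvL w ln) (pvR w ln)]
            = if b ≤ max (pvL w ln) (pvR w ln) then 1 + pvGd bs []
              else pvGd bs [max (pvL w ln) (pvR w ln)] from rfl]
        rw [if_pos (le_max_iff.mpr hfit), pvGd_nil_right]
        by_cases hLR : pvL w ln ≥ pvR w ln
        · rw [if_pos hLR, pvScanB_done _ _ _ _ _ _ _ (by push_cast; omega)]
          ring
        · rw [if_neg hLR, pvScanB_done _ _ _ _ _ _ _ (by push_cast; omega)]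
          ring
      · rw [if_neg hfit]
        have h1 : min (pvL w ln) (w.getD ln 0) = pvL w ln :=
          min_eq_left (pvL_le_getD w ln (by omega))
        have h2 : min (pvR w ln) (w.getD ln 0) = pvR w ln :=
          min_eq_left (pvR_le_getD w ln (by omega))
        have := ih ln 0 (pvL w ln) (pvR w ln) cnt (by omega)
          (by simpa using h1) (by simpa using h2)
        simp only [Nat.add_zero] at this
        rw [this]
        rw [show pvStream w ln 0 = [max (pvL w ln) (pvR w ln)] from rfl]
        rw [show pvGd (b :: bs) [max (pvL w ln) (pvR w ln)]
            = if b ≤ max (pvL w ln) (pvR w ln) then 1 + pvGd bs []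
              else pvGd bs [max (pvL w ln) (pvR w ln)] from rfl]
        rw [if_neg (fun hc => hfit (le_max_iff.mp hc))]
    | succ k =>
      rw [pvStream]
      by_cases hLR : pvL w ln ≥ pvR w (ln + (k + 1))
      · simp only [if_pos hLR]
        rw [show pvGd (b :: bs) (pvL w ln :: pvStream w (ln + 1) k)
            = if b ≤ pvL w ln then 1 + pvGd bs (pvStream w (ln + 1) k)
              else pvGd bs (pvL w ln :: pvStream w (ln + 1) k) from rfl]
        by_cases hb : b ≤ pvL w ln
        · rw [if_pos hb, if_pos (Or.inl hb)]
          have hcast : ((ln : Int)) + 1 = ((ln + 1 : Nat) : Int) := by push_cast; ring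
          have hcast2 : ((ln + (k + 1) : Nat) : Int) = ((ln + 1 + k : Nat) : Int) := by
            push_cast; ring
          rw [hcast, hcast2]
          rw [ih (ln + 1) k (pvL w ln) (pvR w (ln + (k + 1))) (cnt + 1) (by omega)
            (pvL_succ w ln (by omega)).symm
            (by
              rw [show ln + 1 + k = ln + (k + 1) from by omega]
              exact min_eq_left (pvR_le_getD w (ln + (k + 1)) (by omega)))]
          ring
        · have hfit : ¬(b ≤ pvL w ln ∨ b ≤ pvR w (ln + (k + 1))) := by
            rintro (h1 | h1)
            · exact hb h1
            · exact hb (le_trans h1 hLR)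
          rw [if_neg hb, if_neg hfit]
          rw [ih ln (k + 1) (pvL w ln) (pvR w (ln + (k + 1))) cnt (by omega)
            (min_eq_left (pvL_le_getD w ln (by omega)))
            (min_eq_left (pvR_le_getD w (ln + (k + 1)) (by omega)))]
          rw [pvStream, if_pos hLR]
      · simp only [if_neg hLR]
        have hLR' : pvL w ln < pvR w (ln + (k + 1)) := not_le.mp hLR
        rw [show pvGd (b :: bs) (pvR w (ln + (k + 1)) :: pvStream w ln k)
            = if b ≤ pvR w (ln + (k + 1)) then 1 + pvGd bs (pvStream w ln k)
              else pvGd bs (pvR w (ln + (k + 1)) :: pvStream w ln k) from rfl]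
        by_cases hb : b ≤ pvR w (ln + (k + 1))
        · rw [if_pos hb, if_pos (Or.inr hb)]
          have hcast : ((ln + (k + 1) : Nat) : Int) - 1 = ((ln + k : Nat) : Int) := by
            push_cast; ring
          rw [hcast]
          rw [ih ln k (pvL w ln) (pvR w (ln + (k + 1))) (cnt + 1) (by omega)
            (min_eq_left (pvL_le_getD w ln (by omega)))
            (by
              rw [pvR_succ w (ln + k) (by omega), show ln + k + 1 = ln + (k + 1) from by omega,
                min_comm])]
          ring
        · have hfit : ¬(b ≤ pvL w ln ∨ b ≤ pvR w (ln + (k + 1))) := by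
            rintro (h1 | h1)
            · exact hb (le_trans h1 (le_of_lt hLR'))
            · exact hb h1
          rw [if_neg hb, if_neg hfit]
          rw [ih ln (k + 1) (pvL w ln) (pvR w (ln + (k + 1))) cnt (by omega)
            (min_eq_left (pvL_le_getD w ln (by omega)))
            (min_eq_left (pvR_le_getD w (ln + (k + 1)) (by omega)))]
          rw [pvStream, if_neg hLR]

-- ===== VERDICT =====
theorem maxBoxesInWarehouse_spec : Claim_equal_maxBoxesInWarehouse := by
  intro boxes warehouse _hdom hpre
  unfold Spec_maxBoxesInWarehouse
  cases warehouse with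
  | nil => exact absurd rfl hpre
  | cons x xs =>
    have hwne : (x :: xs : List Int) ≠ [] := by simp
    have hlen : (x :: xs : List Int).length = xs.length + 1 := by simp
    have hk : 0 + xs.length < (x :: xs : List Int).length := by omega
    have hA : maxBoxesInWarehouse boxes (x :: xs)
        = pvCountA (PySem.List.sorted boxes (fun v => v) false)
            (PySem.List.sorted
              (List.zipWith max (pvLeftMin (x :: xs)) (pvRightMin (x :: xs)))
              (fun v => v) false) := rfl
    have hB : maxBoxesInWarehouse_alt boxes (x :: xs)
        = pvScanB (x :: xs) (PySem.List.sorted boxes (fun v => v) false).reverse 0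
            (((x :: xs : List Int).length : Int) - 1)
            ((PySem.List.pyGet? (x :: xs) 0).getD 0)
            ((PySem.List.pyGet? (x :: xs) (((x :: xs : List Int).length : Int) - 1)).getD 0)
            0 := rfl
    -- identify the sorted effective heights with the reversed stream
    have hq : PySem.List.sorted
          (List.zipWith max (pvLeftMin (x :: xs)) (pvRightMin (x :: xs)))
          (fun v => v) false
        = (pvStream (x :: xs) 0 xs.length).reverse := by
      rw [pvActual_eq]
      apply PySem.List.sorted_id_eq_of_perm_of_pairwise
      · refine List.Perm.trans (List.reverse_perm _) ?_
        have hp := pvStream_perm (x :: xs) xs.length 0 hk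
        rw [List.range_eq_range', hlen]
        simpa using hp
      · rw [List.pairwise_reverse]
        exact pvStream_sorted (x :: xs) xs.length 0 hk
    -- B's scan over the stream
    have hget0 : ((PySem.List.pyGet? (x :: xs) 0).getD 0) = (x :: xs).getD 0 0 := by
      have := pvGetNat (x :: xs) 0
      simpa using this
    have hcast : (((x :: xs : List Int).length : Int) - 1) = ((0 + xs.length : Nat) : Int) := by
      rw [hlen]; push_cast; ring
    have hgetr : ((PySem.List.pyGet? (x :: xs) (((x :: xs : List Int).length : Int) - 1)).getD 0)
        = (x :: xs).getD (0 + xs.length) 0 := by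
      rw [hcast, pvGetNat]
    have hinvL : min ((x :: xs).getD 0 0) ((x :: xs).getD 0 0) = pvL (x :: xs) 0 := by
      rw [min_self]
      exact (pvL_zero' (x :: xs) hwne).symm
    have hinvR : min ((x :: xs).getD (0 + xs.length) 0) ((x :: xs).getD (0 + xs.length) 0)
        = pvR (x :: xs) (0 + xs.length) := by
      rw [min_self]
      have hlast := pvR_last (x :: xs) hwne
      rw [hlen] at hlast
      simp only [Nat.add_sub_cancel] at hlast
      simpa using hlast.symm
    have hglue := pvScanB_glue (x :: xs) (PySem.List.sorted boxes (fun v => v) false).reverse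
      0 xs.length ((x :: xs).getD 0 0) ((x :: xs).getD (0 + xs.length) 0) 0
      hk hinvL hinvR
    -- pairwise facts
    have hbsp : (PySem.List.sorted boxes (fun v => v) false).reverse.Pairwise (· ≥ ·) := by
      rw [List.pairwise_reverse]
      exact PySem.List.sorted_pairwise boxes (fun v => v)
    have hqp : (pvStream (x :: xs) 0 xs.length).Pairwise (· ≥ ·) :=
      pvStream_sorted (x :: xs) xs.length 0 hk
    -- chain everything
    rw [hA, hB, hq, hget0, hgetr, hcast]
    simp only [Nat.zero_add, Nat.cast_zero] at hglue ⊢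
    rw [hglue, pvGd_eq_countA _ _ hbsp hqp, List.reverse_reverse]
    ring
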